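-- pv_equiv track=rewrite | github.com/MATHmodels/Python | codes/9/cards.py | same_suit
-- ===== SOURCE A (Python) =====
-- def same_suit(hand):
--     # 给定一手牌，返回手牌中每种花色的牌的数量
--     suits = [card[0] for card in hand]
--     counter = {}      # counter[suit] 存放suit花色的数量
--     for suit in suits:
--         count = suits.count(suit)
--         if count > 1: # 只记录同种花色数量大于1的
--             counter[suit] = count
--     return counter
-- ===== SOURCE B (Python) =====
-- def same_suit(hand):
--     counts = {}
--     for card in hand:
--         s = card[0]
--         counts[s] = counts.get(s, 0) + 1
--     return {s: c for s, c in counts.items() if c > 1}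
-- ===== Notes on version B (the rewrite author's own statement) =====
-- stated objective: faster
-- what changed: replaces the quadratic loop that recounts the whole suit list with list.count at every card by a single-pass counting dict followed by a filtering comprehension
import Mathlib
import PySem

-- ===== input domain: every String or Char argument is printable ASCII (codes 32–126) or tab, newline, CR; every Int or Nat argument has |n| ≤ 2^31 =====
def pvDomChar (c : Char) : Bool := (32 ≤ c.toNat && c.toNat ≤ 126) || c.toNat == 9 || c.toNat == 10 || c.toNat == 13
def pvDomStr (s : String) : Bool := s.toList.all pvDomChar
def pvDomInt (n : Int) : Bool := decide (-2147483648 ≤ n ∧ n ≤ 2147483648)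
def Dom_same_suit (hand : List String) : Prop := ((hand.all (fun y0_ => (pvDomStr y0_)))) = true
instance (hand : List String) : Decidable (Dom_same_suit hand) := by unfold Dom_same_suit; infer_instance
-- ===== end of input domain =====

-- B replaces A's quadratic recount (list.count inside the loop) by one counting pass plus a filter; same dict entries in the same order.


-- card[0] as a one-character string; "" only outside Pre_ (empty card ⇒ Python IndexError)
def pvFirst (card : String) : String := ((PySem.Str.pyGet? card 0).map (fun c => String.ofList [c])).getD ""

-- ===== PORT A =====
def same_suit (hand : List String) : List (String × Int) :=
  let suits := hand.map pvFirst
  (suits.foldl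
    (fun counter suit =>
      let count : Int := (PySem.List.count suits suit : Int)
      if count > 1 then counter.insert suit count else counter)
    PySem.Dict.empty).items

-- ===== PORT B =====
def same_suit_alt (hand : List String) : List (String × Int) :=
  let counts := hand.foldl
    (fun d card =>
      let s := pvFirst card
      d.insert s (d.getD s 0 + 1))
    PySem.Dict.empty
  (counts.items.foldl
    (fun d p => if p.2 > 1 then d.insert p.1 p.2 else d)
    PySem.Dict.empty).items

-- ===== PRECONDITION & SPEC =====
-- Pre_ excludes hands containing an empty card string, on which A (card[0]) raises IndexError (B raises there too).
def Pre_same_suit (hand : List String) : Prop := ∀ card ∈ hand, card ≠ ""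
instance (hand : List String) : Decidable (Pre_same_suit hand) := by unfold Pre_same_suit; infer_instance
def pvWitness_same_suit : List String := ["C2", "D5", "C9", "H1", "CK"]

def Spec_same_suit (hand : List String) (out : List (String × Int)) : Prop := out = same_suit_alt hand
instance (hand : List String) (out : List (String × Int)) : Decidable (Spec_same_suit hand out) := by unfold Spec_same_suit; infer_instance

-- ===== CLAIM (what is proved, stated in full; the proofs are below) =====
def Claim_equal_same_suit : Prop := ∀ (hand : List String), Dom_same_suit hand → Pre_same_suit hand → Spec_same_suit hand (same_suit hand)

-- ===== LEMMAS AND PROOFS =====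

-- ordered dedup commutes with filter
lemma pv_ofList_filter (p : String → Bool) (l : List String) :
    PySem.Set.ofList (l.filter p) = (PySem.Set.ofList l).filter p := by
  induction l with
  | nil => simp [PySem.Set.ofList_nil]
  | cons x l ih =>
    by_cases hx : p x = true
    · simp only [List.filter_cons, hx, PySem.Set.ofList_cons, if_true, ih,
        PySem.Set.discard, List.filter_filter]
      congr 1
      exact List.filter_congr (fun y _ => by by_cases h : y = x <;> simp [h, hx, Bool.and_comm])
    · simp only [List.filter_cons, hx, PySem.Set.ofList_cons, if_false, ih,
        PySem.Set.discard, List.filter_filter, Bool.false_eq_true, if_false]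
      refine (List.filter_congr (fun y hy => ?_)).symm
      by_cases h : y = x
      · subst h; simp [hx]
      · simp [h]

-- overwrite with identical value / fresh append, expressed on G
lemma pv_insert_mk (f : String → Int) (G : List String) (s : String) :
    (PySem.Dict.mk (G.map (fun k => (k, f k)))).insert s (f s) =
      PySem.Dict.mk ((PySem.Set.add G s).map (fun k => (k, f k))) := by
  by_cases hm : s ∈ G
  · rw [PySem.Set.add_of_mem hm]
    apply PySem.Dict.ext
    rw [PySem.Dict.items_insert_of_contains]
    · simp only [List.map_map]
      refine List.map_congr_left (fun k hk => ?_)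
      by_cases h : k = s
      · subst h; simp
      · simp [h]
    · simp [hm]
  · rw [PySem.Set.add_of_not_mem hm]
    apply PySem.Dict.ext
    rw [PySem.Dict.items_insert_of_not_contains]
    · simp
    · simp only [PySem.Dict.contains_mk, List.any_map, List.any_eq_false]
      intro x hx
      simp only [Function.comp_apply, beq_iff_eq]
      intro h
      exact hm (h ▸ hx)

lemma pv_foldA (f : String → Int) (l G : List String) (hG : G.Nodup) :
    (l.foldl (fun d s => if f s > 1 then d.insert s (f s) else d)
        (PySem.Dict.mk (G.map (fun k => (k, f k))))) =
      PySem.Dict.mk ((PySem.Set.update G (l.filter (fun s => decide (f s > 1)))).map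
        (fun k => (k, f k))) := by
  induction l generalizing G with
  | nil => simp [PySem.Set.update]
  | cons s l ih =>
    by_cases hs : f s > 1
    · simp only [List.foldl_cons, List.filter_cons, hs, decide_true, if_true,
        PySem.Set.update_cons]
      rw [pv_insert_mk, ih (PySem.Set.add G s) (PySem.Set.nodup_add _ _ hG)]
    · simp only [List.foldl_cons, List.filter_cons, hs, decide_false, if_false,
        Bool.false_eq_true]
      exact ih G hG

-- second loop of B: filtering inserts over fresh distinct keys just filters the items list
lemma pv_fold_if_filter (l : List (String × Int)) (d : PySem.Dict String Int) :
    l.foldl (fun d p => if p.2 > 1 then d.insert p.1 p.2 else d) d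
      = (l.filter (fun p => decide (p.2 > 1))).foldl (fun d p => d.insert p.1 p.2) d := by
  induction l generalizing d with
  | nil => rfl
  | cons p l ih =>
    by_cases hp : p.2 > 1
    · simp only [List.foldl_cons, List.filter_cons, hp, decide_true, if_true, ih]
    · simp only [List.foldl_cons, List.filter_cons, hp, decide_false, if_false,
        Bool.false_eq_true, ih]

lemma pv_foldB (l : List (String × Int)) (hnd : (l.map Prod.fst).Nodup) :
    (l.foldl (fun d p => if p.2 > 1 then d.insert p.1 p.2 else d)
        PySem.Dict.empty).items = l.filter (fun p => decide (p.2 > 1)) := by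
  rw [pv_fold_if_filter]
  have hnd' : ((l.filter (fun p => decide (p.2 > 1))).map Prod.fst).Nodup :=
    hnd.sublist (List.Sublist.map Prod.fst List.filter_sublist)
  rw [PySem.Dict.items_foldl_insert_fresh (l.filter (fun p => decide (p.2 > 1)))
    Prod.fst Prod.snd PySem.Dict.empty (by intro a _; simp) hnd']
  simp [PySem.Dict.empty]

-- ===== VERDICT (by name: the statement is the Claim_ definition above) =====
theorem same_suit_spec : Claim_equal_same_suit := by
  intro hand _ _
  unfold Spec_same_suit same_suit same_suit_alt
  -- B side: counts = counter suits
  have hB : hand.foldl (fun (d : PySem.Dict String Int) card =>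
        d.insert (pvFirst card) (d.getD (pvFirst card) 0 + 1)) PySem.Dict.empty
      = PySem.Dict.counter (hand.map pvFirst) := by
    rw [← PySem.Dict.foldl_insert_getD_add_one_eq_counter, List.foldl_map]
  simp only [hB]
  rw [pv_foldB _ (by
    rw [PySem.Dict.items_counter]
    simp only [List.map_map]
    simp [Function.comp_def, PySem.Set.nodup_ofList (hand.map pvFirst)])]
  rw [PySem.Dict.items_counter]
  -- A side
  have hA := pv_foldA (fun s => ((PySem.List.count (hand.map pvFirst) s : Nat) : Int))
    (hand.map pvFirst) [] List.nodup_nil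
  simp only [List.map_nil] at hA
  rw [show (PySem.Dict.empty : PySem.Dict String Int) = PySem.Dict.mk [] from rfl, hA,
    PySem.Set.update_nil_left]
  rw [pv_ofList_filter]
  simp [List.filter_map, Function.comp_def, PySem.List.count_eq]
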